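-- pv_equiv track=rewrite | github.com/jtarriela/LazyJobSearch | libs/autoapply/template_dsl.py | _find_closest_option
-- ===== SOURCE A (Python) =====
-- from typing import Dict, List, Optional, Any, Union, Callable
--
-- def _find_closest_option(value: str, options: List[str]) -> Optional[str]:
--     """Find closest matching option"""
--     value_lower = value.lower()
--
--     # Exact match (case insensitive)
--     for option in options:
--         if option.lower() == value_lower:
--             return option
--
--     # Contains match
--     for option in options:
--         if value_lower in option.lower() or option.lower() in value_lower:
--             return option
--
--     return None
-- ===== SOURCE B (Python) =====
-- from typing import List, Optional
--
-- def _find_closest_option(value: str, options: List[str]) -> Optional[str]: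
--     """Single pass: return immediately on exact (case-insensitive) match;
--     remember the first substring match as a fallback, returned after the loop."""
--     value_lower = value.lower()
--     fallback = None
--     for option in options:
--         opt_lower = option.lower()
--         if opt_lower == value_lower:
--             return option
--         if fallback is None and (value_lower in opt_lower or opt_lower in value_lower):
--             fallback = option
--     return fallback
-- ===== Notes on version B (the rewrite author's own statement) =====
-- stated objective: alternative
-- what changed: Replaced A's two sequential scans (exact pass, then substring pass) with a single scan that returns on exact match and carries the first substring match as a fallback accumulator.
import Mathlib
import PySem

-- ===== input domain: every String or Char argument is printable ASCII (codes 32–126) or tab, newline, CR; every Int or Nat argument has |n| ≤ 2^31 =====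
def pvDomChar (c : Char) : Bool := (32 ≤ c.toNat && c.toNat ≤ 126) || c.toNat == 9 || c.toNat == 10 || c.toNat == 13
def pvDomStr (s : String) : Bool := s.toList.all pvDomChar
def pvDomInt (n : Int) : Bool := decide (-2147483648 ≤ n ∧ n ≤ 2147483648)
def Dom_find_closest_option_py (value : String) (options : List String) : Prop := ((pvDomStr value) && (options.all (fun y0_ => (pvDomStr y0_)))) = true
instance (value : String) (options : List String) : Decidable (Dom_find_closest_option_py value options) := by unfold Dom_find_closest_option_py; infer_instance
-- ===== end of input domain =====

-- B replaces A's two sequential scans with one scan carrying a fallback accumulator (alternative decomposition, same cost).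

-- ===== PORT A =====
-- first loop: exact case-insensitive match; second loop: substring match; else None
def find_closest_option_py (value : String) (options : List String) : Option String :=
  let value_lower := PySem.Str.lower value
  match options.find? (fun option => PySem.Str.lower option == value_lower) with
  | some option => some option
  | none =>
    match options.find? (fun option =>
        PySem.Str.isIn value_lower (PySem.Str.lower option)
        || PySem.Str.isIn (PySem.Str.lower option) value_lower) with
    | some option => some option
    | none => none

-- ===== PORT B =====
-- single pass: exact match returns immediately; first substring match recorded as fallback
def find_closest_option_alt_go (value_lower : String) (fallback : Option String) :
    List String → Option String
  | [] => fallback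
  | option :: rest =>
    let opt_lower := PySem.Str.lower option
    if opt_lower == value_lower then some option
    else if fallback.isNone
        && (PySem.Str.isIn value_lower opt_lower || PySem.Str.isIn opt_lower value_lower) then
      find_closest_option_alt_go value_lower (some option) rest
    else
      find_closest_option_alt_go value_lower fallback rest

def find_closest_option_py_alt (value : String) (options : List String) : Option String :=
  find_closest_option_alt_go (PySem.Str.lower value) none options

-- ===== PRECONDITION & SPEC =====
def Spec_find_closest_option_py (value : String) (options : List String) (out : Option String) : Prop := out = find_closest_option_py_alt value options
instance (value : String) (options : List String) (out : Option String) : Decidable (Spec_find_closest_option_py value options out) := by unfold Spec_find_closest_option_py; infer_instance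

-- ===== CLAIM (what is proved, stated in full; the proofs are below) =====
def Claim_equal_find_closest_option_py : Prop := ∀ (value : String) (options : List String), Dom_find_closest_option_py value options → Spec_find_closest_option_py value options (find_closest_option_py value options)

-- ===== LEMMAS AND PROOFS =====
-- Characterisation of B's loop: exact match in the remainder wins; otherwise the
-- carried fallback; otherwise the first substring match in the remainder.
theorem alt_go_eq (vl : String) (fb : Option String) (opts : List String) :
    find_closest_option_alt_go vl fb opts =
      match opts.find? (fun o => PySem.Str.lower o == vl) with
      | some o => some o
      | none =>
        match fb with
        | some f => some f
        | none => opts.find? (fun o =>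
            PySem.Str.isIn vl (PySem.Str.lower o)
            || PySem.Str.isIn (PySem.Str.lower o) vl) := by
  induction opts generalizing fb with
  | nil => cases fb <;> simp [find_closest_option_alt_go]
  | cons o rest ih =>
    simp only [find_closest_option_alt_go, List.find?]
    by_cases hx : (PySem.Str.lower o == vl) = true
    · simp [hx]
    · simp only [hx, Bool.false_eq_true, if_false]
      cases fb with
      | some f => simp [ih]
      | none =>
        by_cases hs : (PySem.Str.isIn vl (PySem.Str.lower o)
            || PySem.Str.isIn (PySem.Str.lower o) vl) = true
        · simp only [Option.isNone_none, Bool.true_and, hs, if_true, ih]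
        · simp only [Option.isNone_none, Bool.true_and, hs, Bool.false_eq_true, if_false, ih]

-- ===== VERDICT (by name: the statement is the Claim_ definition above) =====
theorem find_closest_option_py_spec : Claim_equal_find_closest_option_py := by
  intro value options _
  unfold Spec_find_closest_option_py find_closest_option_py find_closest_option_py_alt
  rw [alt_go_eq]
  cases h1 : options.find? (fun o => PySem.Str.lower o == PySem.Str.lower value)
  · simp only [h1]
    cases h2 : options.find? (fun o =>
        PySem.Str.isIn (PySem.Str.lower value) (PySem.Str.lower o)
        || PySem.Str.isIn (PySem.Str.lower o) (PySem.Str.lower value)) <;> simp only [h2]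
  · simp only [h1]
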